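-- pv_equiv track=rewrite | github.com/HannahYun/Algorithm | 프로그래머스/unrated/159994. 카드 뭉치/카드 뭉치.py | solution
-- ===== SOURCE A (Python) =====
-- def solution(cards1, cards2, goal):
--     answer = ''
--     for g in goal:
--         if len(cards1) != 0 and g in cards1[0]:
--             cards1.pop(0)
--         elif len(cards2) != 0 and g in cards2[0]:
--             cards2.pop(0)
--         else:
--             answer = "No"
--             break
--     if answer != "No":
--         answer = "Yes"
--     return answer
-- ===== SOURCE B (Python) =====
-- def solution(cards1, cards2, goal):
--     # Fold over goal with an Option-like state (i, j) of consumed-prefix lengths;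
--     # None means a goal word could not be drawn.  Inputs are left unmutated.
--     def step(st, g):
--         if st is None:
--             return None
--         i, j = st
--         if i < len(cards1) and g in cards1[i]:
--             return (i + 1, j)
--         if j < len(cards2) and g in cards2[j]:
--             return (i, j + 1)
--         return None
--     st = (0, 0)
--     for g in goal:
--         st = step(st, g)
--     return "Yes" if st is not None else "No"
-- ===== Notes on version B (the rewrite author's own statement) =====
-- stated objective: alternative
-- what changed: B replaces A's destructive pop(0)-and-break loop with a non-mutating fold over goal carrying an optional pair of consumed-prefix counters (None once a word cannot be drawn), mapped to Yes/No at the end; B also leaves the inputs unmutated.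
import Mathlib
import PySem

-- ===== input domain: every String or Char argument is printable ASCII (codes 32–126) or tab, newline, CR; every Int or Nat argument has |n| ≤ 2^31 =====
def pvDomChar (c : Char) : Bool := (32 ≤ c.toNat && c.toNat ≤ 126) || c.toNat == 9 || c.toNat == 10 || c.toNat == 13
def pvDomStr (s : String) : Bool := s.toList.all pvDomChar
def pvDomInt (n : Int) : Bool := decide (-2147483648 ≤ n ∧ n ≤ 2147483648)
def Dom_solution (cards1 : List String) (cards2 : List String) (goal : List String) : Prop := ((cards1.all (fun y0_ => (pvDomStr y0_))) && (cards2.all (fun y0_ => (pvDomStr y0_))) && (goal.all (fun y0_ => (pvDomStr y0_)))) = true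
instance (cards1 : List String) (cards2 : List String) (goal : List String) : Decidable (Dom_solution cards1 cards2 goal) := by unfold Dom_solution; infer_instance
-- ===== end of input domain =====

-- B: a non-mutating fold over goal with an optional pair of consumed-prefix counters instead of
-- A's pop(0)-and-break loop (return value only: Python A mutates cards1/cards2 via pop(0); B does not).
-- Note: A tests `g in cards1[0]` — Python SUBSTRING membership, ported with PySem.Str.isIn.

-- ===== PORT A =====
def solutionLoopA (cards1 : List String) (cards2 : List String) (goal : List String) : String :=
  match goal with
  | [] => "Yes"
  | g :: gs =>
    if !cards1.isEmpty && PySem.Str.isIn g (cards1.headD "") then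
      solutionLoopA cards1.tail cards2 gs            -- cards1.pop(0)
    else if !cards2.isEmpty && PySem.Str.isIn g (cards2.headD "") then
      solutionLoopA cards1 cards2.tail gs            -- cards2.pop(0)
    else "No"                                        -- answer = "No"; break

def solution (cards1 : List String) (cards2 : List String) (goal : List String) : String :=
  solutionLoopA cards1 cards2 goal

-- ===== PORT B =====
-- step: the inner helper of Source B, one fold step on the optional counter pair
def stepB (cards1 : List String) (cards2 : List String) (st : Option (Nat × Nat)) (g : String) : Option (Nat × Nat) :=
  match st with
  | none => none
  | some (i, j) =>
    if i < cards1.length && PySem.Str.isIn g (cards1.getD i "") then some (i + 1, j)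
    else if j < cards2.length && PySem.Str.isIn g (cards2.getD j "") then some (i, j + 1)
    else none

def solution_alt (cards1 : List String) (cards2 : List String) (goal : List String) : String :=
  if (goal.foldl (stepB cards1 cards2) (some (0, 0))).isSome then "Yes" else "No"

-- ===== PRECONDITION & SPEC =====
def Spec_solution (cards1 : List String) (cards2 : List String) (goal : List String) (out : String) : Prop := out = solution_alt cards1 cards2 goal
instance (cards1 : List String) (cards2 : List String) (goal : List String) (out : String) : Decidable (Spec_solution cards1 cards2 goal out) := by unfold Spec_solution; infer_instance

-- ===== CLAIM (what is proved, stated in full; the proofs are below) =====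
def Claim_equal_solution : Prop := ∀ (cards1 : List String) (cards2 : List String) (goal : List String), Dom_solution cards1 cards2 goal → Spec_solution cards1 cards2 goal (solution cards1 cards2 goal)

-- ===== LEMMAS AND PROOFS =====

-- once the fold state is none it stays none
theorem foldl_stepB_none (c1 c2 : List String) (gs : List String) :
    gs.foldl (stepB c1 c2) none = none := by
  induction gs with
  | nil => rfl
  | cons g gs ih => simpa [stepB] using ih

-- the pop(0) state of A is the drop-i / drop-j suffix of B's untouched lists
theorem loopA_eq_fold (gs : List String) (c1 c2 : List String) (i j : Nat) :
    solutionLoopA (c1.drop i) (c2.drop j) gs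
      = (if (gs.foldl (stepB c1 c2) (some (i, j))).isSome then "Yes" else "No") := by
  induction gs generalizing i j with
  | nil => rfl
  | cons g gs ih =>
    rw [solutionLoopA, List.foldl_cons]
    have e1 : (!(c1.drop i).isEmpty) = decide (i < c1.length) := by
      rcases Nat.lt_or_ge i c1.length with h | h
      · simp [List.isEmpty_eq_false_iff, List.drop_eq_nil_iff, h]
      · simp [List.drop_eq_nil_of_le h, Nat.not_lt.mpr h]
    have e2 : (!(c2.drop j).isEmpty) = decide (j < c2.length) := by
      rcases Nat.lt_or_ge j c2.length with h | h
      · simp [List.isEmpty_eq_false_iff, List.drop_eq_nil_iff, h]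
      · simp [List.drop_eq_nil_of_le h, Nat.not_lt.mpr h]
    have h1 : (c1.drop i).headD "" = c1.getD i "" := by
      simp [List.head?_drop, List.getD_eq_getElem?_getD]
    have h2 : (c2.drop j).headD "" = c2.getD j "" := by
      simp [List.head?_drop, List.getD_eq_getElem?_getD]
    rw [e1, e2, h1, h2, List.tail_drop, List.tail_drop]
    by_cases hA : (decide (i < c1.length) && PySem.Str.isIn g (c1.getD i "")) = true
    · rw [if_pos hA,
        show stepB c1 c2 (some (i, j)) g = some (i + 1, j) from by
          simp only [stepB]; rw [if_pos hA]]
      exact ih (i + 1) j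
    · rw [if_neg hA]
      by_cases hB : (decide (j < c2.length) && PySem.Str.isIn g (c2.getD j "")) = true
      · rw [if_pos hB,
          show stepB c1 c2 (some (i, j)) g = some (i, j + 1) from by
            simp only [stepB]; rw [if_neg hA, if_pos hB]]
        exact ih i (j + 1)
      · rw [if_neg hB,
          show stepB c1 c2 (some (i, j)) g = none from by
            simp only [stepB]; rw [if_neg hA, if_neg hB],
          foldl_stepB_none]
        rfl

-- ===== VERDICT =====
theorem solution_spec : Claim_equal_solution := by
  intro c1 c2 goal _
  show _ = _
  simpa [solution, solution_alt] using loopA_eq_fold goal c1 c2 0 0
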